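-- pv_equiv track=rewrite | github.com/yakim4iik/AOIS_LABS | lab1/lab/to_binary.py | conversion_ten
-- ===== SOURCE A (Python) =====
-- def conversion_ten(x: str) -> int:
--     total = 0
--     step = 0
--     for i in range(len(x) - 1, 0, -1):
--         if x[i] == "1":
--             total += pow(2, step)
--         step += 1
--     if x[0] == "0":
--         return total
--     else:
--         return int("-" + str(total))
-- ===== SOURCE B (Python) =====
-- def conversion_ten(x: str) -> int:
--     value = 0
--     for c in x[1:]:
--         value = value * 2 + (1 if c == "1" else 0)
--     return value if x[0] == "0" else -value
-- ===== Notes on version B (the rewrite author's own statement) =====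
-- stated objective: alternative
-- what changed: Replaces the right-to-left power-of-two accumulation (explicit exponent counter plus pow) with a left-to-right Horner scan maintaining value = value*2 + bit, and returns a plain negation instead of round-tripping the total through str and int.
import Mathlib
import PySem

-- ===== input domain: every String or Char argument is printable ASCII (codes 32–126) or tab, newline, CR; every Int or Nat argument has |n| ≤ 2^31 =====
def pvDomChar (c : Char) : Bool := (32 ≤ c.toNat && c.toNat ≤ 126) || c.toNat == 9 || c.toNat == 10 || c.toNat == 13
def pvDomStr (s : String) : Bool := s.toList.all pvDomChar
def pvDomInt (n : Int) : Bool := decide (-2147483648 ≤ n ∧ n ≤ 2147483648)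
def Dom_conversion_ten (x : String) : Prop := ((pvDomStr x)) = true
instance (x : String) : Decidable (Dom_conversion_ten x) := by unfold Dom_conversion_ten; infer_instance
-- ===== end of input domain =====

-- B replaces A's right-to-left power-of-two sum (exponent counter + pow, then a str/int round-trip for the sign)
-- with a left-to-right Horner scan and a plain negation; return values proved equal for every non-empty string.


-- ===== PORT A =====
-- for i in range(len(x)-1, 0, -1): if x[i] == "1": total += pow(2, step); step += 1
-- x[i] is always in range inside the loop, so pyGetD's default is never read;
-- x[0] raises IndexError exactly on "", which Pre_ excludes.
-- A's last step builds the minus-sign string from str(total) and re-parses it with int();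
-- total ≥ 0 here, so str(total) carries no sign and that parse is exactly the negation:
-- ported by hand as -total, exact on this use.
def conversion_ten (x : String) : Int :=
  let cs := x.toList
  let r := (PySem.List.pyRange (PySem.Str.len x - 1) 0 (-1)).foldl
      (fun (p : Int × Nat) i =>
        ((if PySem.List.pyGetD cs i ' ' = '1' then p.1 + 2 ^ p.2 else p.1), p.2 + 1))
      (0, 0)
  if PySem.List.pyGetD cs 0 ' ' = '0' then r.1
  else -r.1

-- ===== PORT B =====
-- value = 0; for c in x[1:]: value = value*2 + (1 if c == "1" else 0); sign from x[0]
def conversion_ten_alt (x : String) : Int :=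
  let cs := x.toList
  let value := (PySem.List.slice cs (some 1) none).foldl
      (fun v c => v * 2 + (if c = '1' then 1 else 0)) 0
  if PySem.List.pyGetD cs 0 ' ' = '0' then value else -value

-- ===== PRECONDITION & SPEC =====
-- Python A (and B) raise IndexError reading x[0] on the empty string; everything else returns.
def Pre_conversion_ten (x : String) : Prop := x ≠ ""
instance (x : String) : Decidable (Pre_conversion_ten x) := by unfold Pre_conversion_ten; infer_instance
def pvWitness_conversion_ten : String := "1011"

def Spec_conversion_ten (x : String) (out : Int) : Prop := out = conversion_ten_alt x
instance (x : String) (out : Int) : Decidable (Spec_conversion_ten x out) := by unfold Spec_conversion_ten; infer_instance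

-- ===== CLAIM (what is proved, stated in full; the proofs are below) =====
def Claim_equal_conversion_ten : Prop := ∀ (x : String), Dom_conversion_ten x → Pre_conversion_ten x → Spec_conversion_ten x (conversion_ten x)

-- ===== LEMMAS AND PROOFS =====

-- A's accumulator over a list of characters read back-to-front equals Horner's value of the
-- forward list, shifted by the starting exponent.
theorem pv_key (l : List Char) : ∀ (v : Int) (s : Nat),
    (l.foldl (fun (p : Int × Nat) c =>
        ((if c = '1' then p.1 + 2 ^ p.2 else p.1), p.2 + 1)) (v, s)).1
      = v + (l.reverse.foldl (fun v c => v * 2 + (if c = '1' then 1 else 0)) 0) * 2 ^ s := by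
  induction l with
  | nil => intro v s; simp
  | cons c t ih =>
    intro v s
    simp only [List.foldl_cons, List.reverse_cons, List.foldl_append, List.foldl_cons,
      List.foldl_nil]
    rw [ih]
    by_cases hc : c = '1' <;> simp [hc, pow_succ] <;> ring

theorem conversion_ten_eq_alt (x : String) : conversion_ten x = conversion_ten_alt x := by
  unfold conversion_ten conversion_ten_alt
  simp only [PySem.List.slice_from_one]
  have hidx : PySem.List.pyRange (PySem.Str.len x - 1) 0 (-1)
      = (PySem.List.pyRange 1 (PySem.Str.len x) 1).reverse := by
    rw [PySem.List.pyRange_neg_one_eq_reverse]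
    norm_num
  rw [hidx]
  rw [show (List.foldl (fun (p : Int × Nat) i => ((if PySem.List.pyGetD x.toList i ' ' = '1' then p.1 + 2 ^ p.2 else p.1), p.2 + 1)) (0, 0) (PySem.List.pyRange 1 (PySem.Str.len x) 1).reverse)
      = (List.foldl (fun (p : Int × Nat) c => ((if c = '1' then p.1 + 2 ^ p.2 else p.1), p.2 + 1)) (0, 0) (((PySem.List.pyRange 1 (PySem.Str.len x) 1).map (fun i => PySem.List.pyGetD x.toList i ' ')).reverse))
    from by rw [← List.map_reverse, List.foldl_map]]
  have hmap : (PySem.List.pyRange 1 (PySem.Str.len x) 1).map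
      (fun i => PySem.List.pyGetD x.toList i ' ') = x.toList.drop 1 := by
    have := PySem.List.map_pyGetD_pyRange (xs := x.toList) (a := 1) (d := ' ') (by norm_num)
    simpa using this
  rw [hmap]
  rw [pv_key]
  simp [List.drop_one]

-- ===== VERDICT (by name: the statement is the Claim_ definition above) =====
theorem conversion_ten_spec : Claim_equal_conversion_ten := by
  intro x _ _
  unfold Spec_conversion_ten
  exact conversion_ten_eq_alt x
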